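-- pv_equiv track=rewrite | github.com/aastha-malik/My-LeetCode-Journey | 0386-lexicographical-numbers/0386-lexicographical-numbers.py | lexicalOrder
-- ===== SOURCE A (Python) =====
-- from typing import List
--
-- def lexicalOrder(n: int) -> List[int]:
--     arr = []
--     for i in range(1, n+1):
--         arr.append(str(i))
--     res = sorted(arr)
--     for i in range(n):
--         res[i] = int(res[i])
--     return res
-- ===== SOURCE B (Python) =====
-- from typing import List
--
-- def lexicalOrder(n: int) -> List[int]:
--     res = []
--     cur = 1
--     while len(res) < n:
--         res.append(cur)
--         if cur * 10 <= n:
--             cur *= 10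
--         else:
--             while cur % 10 == 9 or cur + 1 > n:
--                 cur //= 10
--             cur += 1
--     return res
-- ===== Notes on version B (the rewrite author's own statement) =====
-- stated objective: alternative
-- what changed: A materialises str(i) for every i, sorts the n strings lexicographically and parses each back to int; B never builds or sorts strings: it emits the numbers directly in lexicographic order by an iterative preorder walk of the implicit decimal prefix tree (descend by appending a zero digit, otherwise pop trailing exhausted branches by dropping the last digit and increment).
import Mathlib
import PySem

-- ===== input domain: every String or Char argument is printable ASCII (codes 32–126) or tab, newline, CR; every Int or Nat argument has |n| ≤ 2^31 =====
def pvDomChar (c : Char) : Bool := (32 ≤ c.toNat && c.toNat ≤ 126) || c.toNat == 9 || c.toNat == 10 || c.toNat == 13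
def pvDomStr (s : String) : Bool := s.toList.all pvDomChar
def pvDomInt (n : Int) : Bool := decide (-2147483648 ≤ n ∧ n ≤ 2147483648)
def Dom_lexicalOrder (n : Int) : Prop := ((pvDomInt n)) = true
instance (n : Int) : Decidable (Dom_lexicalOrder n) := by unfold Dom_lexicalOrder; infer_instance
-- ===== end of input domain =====

-- B replaces A's build-all-strings-and-sort by the classic pointer walk that emits the numbers
-- directly in lexicographic order (preorder of the implicit 10-ary prefix tree: multiply by 10
-- to descend, pop trailing branches and increment to advance) — a genuinely different algorithm
-- of comparable measured cost; proved to return exactly A's list for every n.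

-- ===== PORT A =====
-- int(res[i]): every string A converts back is str(i) for some i ≥ 1 — a nonempty pure-digit
-- ASCII string.  On exactly these strings Python's int() is this left-to-right fold (its
-- whitespace/sign/underscore handling is never exercised).  It is ported by hand because the
-- prelude's PySem.Int.ofStr? hides its digit-parsing core in a private definition, about which
-- no general lemma can be stated; this fold is exact on every string this port feeds it.
def pvIntOfDec (cs : List Char) : Int := cs.foldl (fun v c => 10 * v + ((c.toNat : Int) - 48)) 0

def lexicalOrder (n : Int) : List Int :=
  -- arr = []
  -- for i in range(1, n+1): arr.append(str(i))
  let arr := (PySem.List.pyRange 1 (n + 1)).foldl (fun acc i => acc ++ [PySem.Int.toStr i]) []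
  -- res = sorted(arr)
  let res := PySem.List.sorted arr (fun s => s) false
  -- for i in range(n): res[i] = int(res[i])   -- an in-place elementwise conversion of the
  -- n = len(res) entries, ported as a map over the same list
  res.map (fun s => pvIntOfDec s.toList)

-- ===== PORT B =====
-- while cur % 10 == 9 or cur + 1 > n: cur //= 10
-- The Nat argument is fuel making the recursion structural; the caller passes cur.toNat, which
-- bounds the number of '//= 10' steps whenever the Python loop runs (there n ≥ 1 and cur ≥ 1,
-- each step shrinks cur by a factor 10, and at cur = 0 the condition is already false).
def popWhile : Nat → Int → Int → Int
  | 0, _, cur => cur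
  | f + 1, n, cur =>
    if PySem.Int.mod cur 10 = 9 ∨ cur + 1 > n then popWhile f n (PySem.Int.floordiv cur 10) else cur

-- Int/Nat bridges

-- res = []; cur = 1
-- while len(res) < n: res.append(cur); then descend (cur *= 10) or pop-and-increment
def altGo (n : Int) : Nat → Int → List Int
  | 0, _ => []
  | k + 1, cur => cur :: altGo n k (if cur * 10 ≤ n then cur * 10 else popWhile cur.toNat n cur + 1)

def lexicalOrder_alt (n : Int) : List Int := altGo n n.toNat 1

-- ===== PRECONDITION & SPEC =====
def Spec_lexicalOrder (n : Int) (out : List Int) : Prop := out = lexicalOrder_alt n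
instance (n : Int) (out : List Int) : Decidable (Spec_lexicalOrder n out) := by unfold Spec_lexicalOrder; infer_instance

-- ===== CLAIM (what is proved, stated in full; the proofs are below) =====
def Claim_equal_lexicalOrder : Prop := ∀ (n : Int), Dom_lexicalOrder n → Spec_lexicalOrder n (lexicalOrder n)

-- ===== LEMMAS AND PROOFS =====

-- Decimal digit strings: pvDC m is str(m) for m ≥ 1 (most significant digit first).
def pvDC (m : Nat) : List Char := ((Nat.digits 10 m).map Nat.digitChar).reverse

lemma pvToDigitsCore_eq : ∀ (f m : Nat) (l : List Char), m < f →
    Nat.toDigitsCore 10 f m l = (if m = 0 then ['0'] else pvDC m) ++ l := by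
  intro f
  induction f with
  | zero => omega
  | succ f ih =>
    intro m l hm
    simp only [Nat.toDigitsCore]
    by_cases h0 : m / 10 = 0
    · rw [if_pos h0]
      by_cases hm0 : m = 0
      · subst hm0; simp [pvDC]; rfl
      · rw [if_neg hm0]
        rw [pvDC, Nat.digits_def' (by norm_num : (1:ℕ) < 10) (by omega : 0 < m)]
        rw [h0]
        simp [Nat.mod_eq_of_lt (by omega : m < 10)]
    · rw [if_neg h0]
      rw [ih (m / 10) _ (by omega)]
      rw [if_neg h0]
      rw [if_neg (by omega : ¬ m = 0)]
      rw [pvDC, pvDC, Nat.digits_def' (by norm_num : (1:ℕ) < 10) (by omega : 0 < m)]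
      simp

lemma pvToChars_eq {x : Int} (hx : 1 ≤ x) : PySem.Int.toChars x = pvDC x.toNat := by
  have : ¬ x < 0 := by omega
  simp only [PySem.Int.toChars, if_neg this]
  rw [Nat.toDigits, pvToDigitsCore_eq _ _ _ (by omega)]
  rw [if_neg (by omega : ¬ x.toNat = 0), List.append_nil]

lemma pvDC_zero : pvDC 0 = [] := by simp [pvDC]

lemma pvDC_small {m : Nat} (h1 : 1 ≤ m) (h9 : m < 10) : pvDC m = [Nat.digitChar m] := by
  rw [pvDC, Nat.digits_def' (by norm_num : (1:ℕ) < 10) (by omega)]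
  simp [Nat.mod_eq_of_lt h9, Nat.div_eq_of_lt h9]

lemma pvDC_step {m : Nat} (h : 10 ≤ m) : pvDC m = pvDC (m / 10) ++ [Nat.digitChar (m % 10)] := by
  rw [pvDC, Nat.digits_def' (by norm_num : (1:ℕ) < 10) (by omega)]
  simp [pvDC]

lemma pvDigitChar_toNat {d : Nat} (h : d < 10) : (Nat.digitChar d).toNat = 48 + d := by
  interval_cases d <;> rfl

lemma pvDigitChar_lt_iff {d e : Nat} (hd : d < 10) (he : e < 10) :
    Nat.digitChar d < Nat.digitChar e ↔ d < e := by
  interval_cases d <;> interval_cases e <;> decide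

lemma pvDigitChar_le9 {d : Nat} (h : d < 10) : Nat.digitChar d ≤ '9' := by
  interval_cases d <;> decide

lemma pvDigitChar_ge0 {d : Nat} (h : d < 10) : '0' ≤ Nat.digitChar d := by
  interval_cases d <;> decide

lemma pvDC_mem {m : Nat} {c : Char} (hc : c ∈ pvDC m) : ∃ d, d < 10 ∧ c = Nat.digitChar d := by
  simp only [pvDC, List.mem_reverse, List.mem_map] at hc
  obtain ⟨d, hd, rfl⟩ := hc
  exact ⟨d, Nat.digits_lt_base (by norm_num) hd, rfl⟩

-- head of a decimal string is '1'..'9'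
lemma pvDC_head {m : Nat} (h1 : 1 ≤ m) : ∃ c cs, pvDC m = c :: cs ∧ '1' ≤ c ∧ c ≤ '9' := by
  induction m using Nat.strong_induction_on with
  | _ m ih =>
    by_cases h9 : m < 10
    · refine ⟨Nat.digitChar m, [], pvDC_small h1 h9, ?_, pvDigitChar_le9 h9⟩
      interval_cases m <;> decide
    · obtain ⟨c, cs, hcs, hc1, hc9⟩ := ih (m / 10) (by omega) (by omega)
      exact ⟨c, cs ++ [Nat.digitChar (m % 10)], by rw [pvDC_step (by omega), hcs]; simp, hc1, hc9⟩

-- last digit of a decimal string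
lemma pvDC_last {m : Nat} (h1 : 1 ≤ m) : ∃ q, pvDC m = q ++ [Nat.digitChar (m % 10)] := by
  by_cases h9 : m < 10
  · exact ⟨[], by rw [pvDC_small h1 h9, Nat.mod_eq_of_lt h9]; rfl⟩
  · exact ⟨pvDC (m / 10), pvDC_step (by omega)⟩

-- value of a decimal string
def pvValN (cs : List Char) : Nat := cs.foldl (fun v c => 10 * v + (c.toNat - 48)) 0

lemma pvValN_go (t : List Char) : ∀ a : Nat,
    t.foldl (fun v c => 10 * v + (c.toNat - 48)) a = a * 10 ^ t.length + pvValN t := by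
  induction t with
  | nil => intro a; simp [pvValN]
  | cons c t ih =>
    intro a
    show t.foldl _ (10 * a + (c.toNat - 48)) = _
    rw [ih]
    have h2 : pvValN (c :: t) = (c.toNat - 48) * 10 ^ t.length + pvValN t := by
      show t.foldl _ (10 * 0 + (c.toNat - 48)) = _
      rw [ih]; ring_nf
    rw [h2]
    simp [List.length_cons, pow_succ]
    ring

lemma pvValN_append (s t : List Char) : pvValN (s ++ t) = pvValN s * 10 ^ t.length + pvValN t := by
  rw [pvValN, List.foldl_append, pvValN_go]; rfl

lemma pvValN_DC (m : Nat) : pvValN (pvDC m) = m := by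
  induction m using Nat.strong_induction_on with
  | _ m ih =>
    by_cases h0 : m = 0
    · subst h0; simp [pvDC_zero, pvValN]
    · by_cases h9 : m < 10
      · rw [pvDC_small (by omega) h9]
        show 10 * 0 + ((Nat.digitChar m).toNat - 48) = m
        rw [pvDigitChar_toNat h9]; omega
      · rw [pvDC_step (by omega), pvValN_append]
        rw [ih (m / 10) (by omega)]
        have : pvValN [Nat.digitChar (m % 10)] = m % 10 := by
          show 10 * 0 + ((Nat.digitChar (m % 10)).toNat - 48) = m % 10
          rw [pvDigitChar_toNat (by omega)]; omega
        rw [this]; simp; omega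

lemma pvDC_inj {a b : Nat} (h : pvDC a = pvDC b) : a = b := by
  have := pvValN_DC a; rw [h, pvValN_DC] at this; omega

-- Lex helper lemmas over Char lists
lemma pvLex_append (s : List Char) {t : List Char} (h : t ≠ []) :
    List.Lex (· < ·) s (s ++ t) := by
  induction s with
  | nil => cases t with | nil => exact absurd rfl h | cons c cs => exact List.Lex.nil
  | cons a s ih => exact List.Lex.cons ih

lemma pvLex_mid {a b : Char} (P : List Char) (t u : List Char) (h : a < b) :
    List.Lex (· < ·) (P ++ a :: t) (P ++ b :: u) := by
  induction P with
  | nil => exact List.Lex.rel h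
  | cons c P ih => exact List.Lex.cons ih

lemma pvLex_zero_le {s t : List Char} (h : List.Lex (· < ·) s t) (ht : ∀ c ∈ t, '0' ≤ c) :
    s ++ ['0'] = t ∨ List.Lex (· < ·) (s ++ ['0']) t := by
  induction h with
  | @nil b l =>
    have hb : '0' ≤ b := ht b List.mem_cons_self
    rcases eq_or_lt_of_le hb with hb | hb
    · cases l with
      | nil => left; simp [← hb]
      | cons c cs => right; rw [← hb]; exact List.Lex.cons List.Lex.nil
    · right; exact List.Lex.rel hb
  | @cons a l1 l2 h ih =>
    rcases ih (fun c hc => ht c (List.mem_cons_of_mem _ hc)) with h' | h'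
    · left; rw [List.cons_append, h']
    · right; exact List.Lex.cons h'
  | @rel a l1 b l2 h => right; exact List.Lex.rel h

lemma pvLex_decomp {s t : List Char} (h : List.Lex (· < ·) s t) (hp : ¬ s <+: t) :
    ∃ P a b t1 t2, s = P ++ a :: t1 ∧ t = P ++ b :: t2 ∧ a < b := by
  induction h with
  | @nil b l => exact absurd (List.nil_prefix) hp
  | @cons a l1 l2 h ih =>
    have hp' : ¬ l1 <+: l2 := fun hx => hp (List.cons_prefix_cons.mpr ⟨rfl, hx⟩)
    obtain ⟨P, x, y, t1, t2, h1, h2, hxy⟩ := ih hp'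
    exact ⟨a :: P, x, y, t1, t2, by rw [h1]; rfl, by rw [h2]; rfl, hxy⟩
  | @rel a l1 b l2 h => exact ⟨[], a, b, l1, l2, rfl, rfl, h⟩

-- String-level bridges
lemma pvStrLt {x y : Int} :
    PySem.Int.toStr x < PySem.Int.toStr y ↔ List.Lex (· < ·) (PySem.Int.toChars x) (PySem.Int.toChars y) := by
  rw [String.lt_iff_toList_lt, PySem.Int.toList_toStr, PySem.Int.toList_toStr]
  exact Iff.rfl

lemma pvStrEq {x y : Int} :
    PySem.Int.toStr x = PySem.Int.toStr y ↔ PySem.Int.toChars x = PySem.Int.toChars y := by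
  constructor
  · intro h; rw [← PySem.Int.toList_toStr, ← PySem.Int.toList_toStr, h]
  · intro h
    have h1 : (PySem.Int.toStr x).toList = (PySem.Int.toStr y).toList := by
      rw [PySem.Int.toList_toStr, PySem.Int.toList_toStr, h]
    exact String.ext (by simpa [String.toList] using h1)

lemma pvStrLe {x y : Int} :
    PySem.Int.toStr x ≤ PySem.Int.toStr y ↔
      (PySem.Int.toChars x = PySem.Int.toChars y ∨
        List.Lex (· < ·) (PySem.Int.toChars x) (PySem.Int.toChars y)) := by
  rw [le_iff_lt_or_eq]
  rw [pvStrLt]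
  constructor
  · rintro (h | h)
    · right; exact h
    · left; exact pvStrEq.mp h
  · rintro (h | h)
    · right; exact pvStrEq.mpr h
    · left; exact h

lemma pvMod10 {x : Int} (hx : 0 ≤ x) : PySem.Int.mod x 10 = ((x.toNat % 10 : Nat) : Int) := by
  rw [PySem.Int.mod_eq_emod_of_pos (by norm_num)]; omega

lemma pvDiv10 {x : Int} (hx : 0 ≤ x) : PySem.Int.floordiv x 10 = ((x.toNat / 10 : Nat) : Int) := by
  rw [PySem.Int.floordiv_eq_ediv_of_pos (by norm_num)]; omega

-- numeric value of an int's digit string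
lemma pvVal_toChars {x : Int} (hx : 1 ≤ x) : (pvValN (PySem.Int.toChars x) : Int) = x := by
  rw [pvToChars_eq hx, pvValN_DC]; omega

-- a proper decimal-prefix extension is at least 10 times bigger
lemma pvPrefix_ten {x y : Int} (hx : 1 ≤ x) (hy : 1 ≤ y)
    (h : PySem.Int.toChars x <+: PySem.Int.toChars y) (hne : PySem.Int.toChars x ≠ PySem.Int.toChars y) :
    10 * x ≤ y := by
  obtain ⟨t, ht⟩ := h
  have htne : t ≠ [] := by
    rintro rfl
    rw [List.append_nil] at ht
    exact hne ht
  have hv : pvValN (PySem.Int.toChars y) = pvValN (PySem.Int.toChars x) * 10 ^ t.length + pvValN t := by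
    rw [← ht, pvValN_append]
  have h10 : 10 ≤ 10 ^ t.length := by
    calc (10:Nat) = 10 ^ 1 := (pow_one 10).symm
    _ ≤ 10 ^ t.length := Nat.pow_le_pow_right (by norm_num) (by
        cases t with | nil => exact absurd rfl htne | cons a b => simp)
  have hx' := pvVal_toChars hx
  have hy' := pvVal_toChars hy
  have : pvValN (PySem.Int.toChars x) * 10 ≤ pvValN (PySem.Int.toChars y) := by
    calc pvValN (PySem.Int.toChars x) * 10 ≤ pvValN (PySem.Int.toChars x) * 10 ^ t.length :=
          Nat.mul_le_mul_left _ h10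
    _ ≤ _ := by omega
  omega

-- bumping the last digit
lemma pvBump {c : Int} (h1 : 1 ≤ c) (h9 : PySem.Int.mod c 10 ≠ 9) :
    ∃ q d, d < 9 ∧ PySem.Int.toChars c = q ++ [Nat.digitChar d] ∧
      PySem.Int.toChars (c + 1) = q ++ [Nat.digitChar (d + 1)] := by
  rw [pvMod10 (by omega)] at h9
  have hd9 : c.toNat % 10 < 9 := by omega
  rw [pvToChars_eq h1, pvToChars_eq (by omega)]
  by_cases hs : c < 10
  · refine ⟨[], c.toNat, by omega, ?_, ?_⟩
    · rw [pvDC_small (by omega) (by omega)]; simp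
    · rw [pvDC_small (by omega) (by omega)]
      simp only [List.nil_append, List.cons.injEq, and_true]
      congr 1; omega
  · refine ⟨pvDC (c.toNat / 10), c.toNat % 10, by omega, pvDC_step (by omega), ?_⟩
    rw [pvDC_step (by omega)]
    have h1 : (c+1).toNat / 10 = c.toNat / 10 := by omega
    have h2 : (c+1).toNat % 10 = c.toNat % 10 + 1 := by omega
    rw [h1, h2]

lemma pvValN_single (c : Char) : pvValN [c] = c.toNat - 48 := by simp [pvValN]

lemma pvChars_digit {x : Int} (hx : 1 ≤ x) {c : Char} (hc : c ∈ PySem.Int.toChars x) :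
    ∃ d, d < 10 ∧ c = Nat.digitChar d := pvDC_mem (pvToChars_eq hx ▸ hc)

lemma pvDigitChar_inj {d e : Nat} (hd : d < 10) (he : e < 10)
    (h : Nat.digitChar d = Nat.digitChar e) : d = e := by
  have h1 := pvDigitChar_toNat hd
  have h2 := pvDigitChar_toNat he
  rw [h] at h1; omega

-- value comparison used twice: cur = val (P ++ [a]), y = val (P ++ b :: t2), a < b ⇒ cur + 1 ≤ y
lemma pvVal_lt {cur y : Int} {P t2 : List Char} {da db : Nat} (hda : da < 10) (hdb : db < 10)
    (hab : da < db) (h1 : 1 ≤ cur) (hy : 1 ≤ y)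
    (hs : PySem.Int.toChars cur = P ++ [Nat.digitChar da])
    (ht : PySem.Int.toChars y = P ++ Nat.digitChar db :: t2) : cur + 1 ≤ y := by
  have hc : (pvValN (PySem.Int.toChars cur) : Int) = cur := pvVal_toChars h1
  have hyv : (pvValN (PySem.Int.toChars y) : Int) = y := pvVal_toChars hy
  rw [hs, pvValN_append, pvValN_single, pvDigitChar_toNat hda] at hc
  have ht2 : (P ++ Nat.digitChar db :: t2) = (P ++ [Nat.digitChar db]) ++ t2 := by simp
  rw [ht, ht2, pvValN_append, pvValN_append, pvValN_single, pvDigitChar_toNat hdb] at hyv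
  have hp : 1 ≤ 10 ^ t2.length := Nat.one_le_pow _ _ (by norm_num)
  have h3 : pvValN P * 10 ^ [Nat.digitChar db].length + (48 + db - 48) ≤
      (pvValN P * 10 ^ [Nat.digitChar db].length + (48 + db - 48)) * 10 ^ t2.length + pvValN t2 :=
    le_trans (Nat.le_mul_of_pos_right _ hp) (Nat.le_add_right _ _)
  simp only [List.length_singleton, pow_one] at hc hyv h3
  omega


-- If t1 = [] (the popped pointer's string is P ++ [a], with key y = P ++ b :: t2, a < b),
-- neither loop condition can hold.
lemma pvPop_stop {n cur y : Int} {P t1 t2 : List Char} {da db : Nat}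
    (h1 : 1 ≤ cur) (hy1 : 1 ≤ y) (hyn : y ≤ n)
    (hda : da < 10) (hdb : db < 10) (hab : da < db)
    (hs : PySem.Int.toChars cur = P ++ Nat.digitChar da :: t1)
    (ht : PySem.Int.toChars y = P ++ Nat.digitChar db :: t2)
    (ht1 : t1 = [])
    (hc : PySem.Int.mod cur 10 = 9 ∨ cur + 1 > n) : False := by
  subst ht1
  obtain ⟨q, hq⟩ := pvDC_last (m := cur.toNat) (by omega)
  rw [← pvToChars_eq h1] at hq
  have hqs : q ++ [Nat.digitChar (cur.toNat % 10)] = P ++ [Nat.digitChar da] := by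
    rw [← hq, hs]
  obtain ⟨hq1, hq2⟩ := List.append_inj' hqs rfl
  have hlast : cur.toNat % 10 = da :=
    pvDigitChar_inj (by omega) hda (by injection hq2)
  rcases hc with hc | hc
  · rw [pvMod10 (by omega)] at hc
    omega
  · exact absurd (pvVal_lt hda hdb hab h1 hy1 hs ht) (by omega)


lemma pvPop_spec (n : Int) : ∀ (f : Nat) (cur : Int), cur.toNat ≤ f → 1 ≤ cur →
    ∀ y : Int, 1 ≤ y → y ≤ n →
    List.Lex (· < ·) (PySem.Int.toChars cur) (PySem.Int.toChars y) →
    ¬ (PySem.Int.toChars cur <+: PySem.Int.toChars y) →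
    1 ≤ popWhile f n cur ∧ popWhile f n cur + 1 ≤ n ∧
      (PySem.Int.toChars (popWhile f n cur) <+: PySem.Int.toChars cur) ∧
      PySem.Int.mod (popWhile f n cur) 10 ≠ 9 ∧
      (PySem.Int.toChars (popWhile f n cur + 1) = PySem.Int.toChars y ∨
        List.Lex (· < ·) (PySem.Int.toChars (popWhile f n cur + 1)) (PySem.Int.toChars y)) := by
  intro f
  induction f with
  | zero => intro cur hf h1; omega
  | succ f ih =>
    intro cur hf h1 y hy1 hyn hlex hpre
    obtain ⟨P, a, b, t1, t2, hs, ht, hab0⟩ := pvLex_decomp hlex hpre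
    obtain ⟨da, hda, rfl⟩ := pvChars_digit h1 (by rw [hs]; exact List.mem_append_right _ List.mem_cons_self)
    obtain ⟨db, hdb, rfl⟩ := pvChars_digit hy1 (by rw [ht]; exact List.mem_append_right _ List.mem_cons_self)
    have hab : da < db := (pvDigitChar_lt_iff hda hdb).mp hab0
    by_cases hc : PySem.Int.mod cur 10 = 9 ∨ cur + 1 > n
    · -- loop body runs: t1 ≠ [], cur ≥ 10, recurse on cur / 10
      have ht1 : t1 ≠ [] := fun h => pvPop_stop h1 hy1 hyn hda hdb hab hs ht h hc
      have hcur10 : 10 ≤ cur := by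
        by_contra hlt10
        have : PySem.Int.toChars cur = [Nat.digitChar cur.toNat] := by
          rw [pvToChars_eq h1, pvDC_small (by omega) (by omega)]
        rw [this] at hs
        have hlen := congrArg List.length hs
        simp [List.length_append, List.length_cons] at hlen
        exact ht1 (List.eq_nil_of_length_eq_zero (by omega))
      -- decimal structure of cur
      have hm10 : (10:Nat) ≤ cur.toNat := by omega
      have hstep : PySem.Int.toChars cur = pvDC (cur.toNat / 10) ++ [Nat.digitChar (cur.toNat % 10)] := by
        rw [pvToChars_eq h1]; exact pvDC_step hm10
      have hcur' : PySem.Int.floordiv cur 10 = ((cur.toNat / 10 : Nat) : Int) := pvDiv10 (by omega)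
      have hc1' : 1 ≤ PySem.Int.floordiv cur 10 := by rw [hcur']; omega
      have htc' : PySem.Int.toChars (PySem.Int.floordiv cur 10) = pvDC (cur.toNat / 10) := by
        rw [hcur', pvToChars_eq (by exact_mod_cast Nat.one_le_iff_ne_zero.mpr (by omega))]
        congr 1
      -- pvDC (cur.toNat / 10) = P ++ digitChar da :: t1.dropLast
      have hsplit : pvDC (cur.toNat / 10) = P ++ Nat.digitChar da :: t1.dropLast := by
        have h1' : P ++ Nat.digitChar da :: t1 =
            (P ++ Nat.digitChar da :: t1.dropLast) ++ [t1.getLast ht1] := by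
          conv_lhs => rw [← List.dropLast_append_getLast ht1]
          simp
        have h2' : (P ++ Nat.digitChar da :: t1.dropLast) ++ [t1.getLast ht1] =
            pvDC (cur.toNat / 10) ++ [Nat.digitChar (cur.toNat % 10)] := by
          rw [← h1', ← hs, hstep]
        exact (List.append_inj' h2' rfl).1.symm
      -- hypotheses for the recursive call
      have hlex' : List.Lex (· < ·) (PySem.Int.toChars (PySem.Int.floordiv cur 10)) (PySem.Int.toChars y) := by
        rw [htc', hsplit, ht]; exact pvLex_mid P _ _ hab0
      have hpre' : ¬ (PySem.Int.toChars (PySem.Int.floordiv cur 10) <+: PySem.Int.toChars y) := by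
        rw [htc', hsplit, ht]
        intro hpp
        rw [List.prefix_append_right_inj] at hpp
        obtain ⟨heq, -⟩ := List.cons_prefix_cons.mp hpp
        exact absurd (pvDigitChar_inj hda hdb heq) (by omega)
      have hfuel : (PySem.Int.floordiv cur 10).toNat ≤ f := by rw [hcur']; omega
      obtain ⟨c1, c2, c3, c4, c5⟩ := ih (PySem.Int.floordiv cur 10) hfuel hc1' y hy1 hyn hlex' hpre'
      have hstep1 : popWhile (f + 1) n cur = popWhile f n (PySem.Int.floordiv cur 10) := by
        simp only [popWhile, if_pos hc]
      rw [hstep1]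
      refine ⟨c1, c2, ?_, c4, c5⟩
      exact c3.trans ⟨[Nat.digitChar (cur.toNat % 10)], by rw [htc']; exact hstep.symm⟩
    · -- loop exits: popWhile = cur
      have hstop : popWhile (f + 1) n cur = cur := by simp only [popWhile, if_neg hc]
      rw [hstop]
      push_neg at hc
      obtain ⟨hc9, hcn⟩ := hc
      refine ⟨h1, by omega, List.prefix_refl _, hc9, ?_⟩
      obtain ⟨q, d, hd, hq, hq1⟩ := pvBump h1 hc9
      cases t1 with
      | nil =>
        -- cur's string is P ++ [digitChar da]; so q = P, d = da
        have hqs : q ++ [Nat.digitChar d] = P ++ [Nat.digitChar da] := by rw [← hq, hs]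
        obtain ⟨hq2, hq3⟩ := List.append_inj' hqs rfl
        have hdda : d = da := pvDigitChar_inj (by omega) hda (by injection hq3)
        subst hdda; subst hq2
        rcases Nat.lt_or_ge (d + 1) db with hlt | hge
        · right; rw [hq1, ht]
          exact pvLex_mid q _ _ ((pvDigitChar_lt_iff (by omega) hdb).mpr hlt)
        · -- d + 1 = db
          have : d + 1 = db := by omega
          subst this
          cases t2 with
          | nil => left; rw [hq1, ht]
          | cons x xs =>
            right; rw [hq1, ht]
            have : q ++ Nat.digitChar (d+1) :: x :: xs = (q ++ [Nat.digitChar (d+1)]) ++ x :: xs := by simp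
            rw [this]
            exact pvLex_append _ (by simp)
      | cons w ws =>
        -- q = P ++ digitChar da :: (w :: ws).dropLast
        right
        have hne : (w :: ws : List Char) ≠ [] := by simp
        have h1' : P ++ Nat.digitChar da :: (w :: ws) =
            (P ++ Nat.digitChar da :: (w :: ws).dropLast) ++ [(w :: ws).getLast hne] := by
          conv_lhs => rw [← List.dropLast_append_getLast hne]
          simp
        have h2' : (P ++ Nat.digitChar da :: (w :: ws).dropLast) ++ [(w :: ws).getLast hne] =
            q ++ [Nat.digitChar d] := by rw [← h1', ← hs, hq]
        have hqP : q = P ++ Nat.digitChar da :: (w :: ws).dropLast := (List.append_inj' h2' rfl).1.symm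
        rw [hq1, hqP, ht]
        have : (P ++ Nat.digitChar da :: (w :: ws).dropLast) ++ [Nat.digitChar (d+1)] =
            P ++ Nat.digitChar da :: ((w :: ws).dropLast ++ [Nat.digitChar (d+1)]) := by simp
        rw [this]
        exact pvLex_mid P _ _ hab0

lemma pvTimes10 {cur : Int} (h1 : 1 ≤ cur) :
    PySem.Int.toChars (cur * 10) = PySem.Int.toChars cur ++ ['0'] := by
  rw [pvToChars_eq h1, pvToChars_eq (by omega)]
  have h : (cur * 10).toNat = cur.toNat * 10 := by omega
  rw [h, pvDC_step (by omega)]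
  have h2 : cur.toNat * 10 / 10 = cur.toNat := by omega
  have h3 : cur.toNat * 10 % 10 = 0 := by omega
  rw [h2, h3]
  rfl

-- the pointer step computes the immediate lexicographic successor bound
lemma pvSucc {n cur y : Int} (h1 : 1 ≤ cur) (hn : cur ≤ n) (hy1 : 1 ≤ y) (hyn : y ≤ n)
    (hlt : PySem.Int.toStr cur < PySem.Int.toStr y) :
    1 ≤ (if cur * 10 ≤ n then cur * 10 else popWhile cur.toNat n cur + 1) ∧
    (if cur * 10 ≤ n then cur * 10 else popWhile cur.toNat n cur + 1) ≤ n ∧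
    PySem.Int.toStr cur < PySem.Int.toStr (if cur * 10 ≤ n then cur * 10 else popWhile cur.toNat n cur + 1) ∧
    PySem.Int.toStr (if cur * 10 ≤ n then cur * 10 else popWhile cur.toNat n cur + 1) ≤ PySem.Int.toStr y := by
  by_cases h10 : cur * 10 ≤ n
  · rw [if_pos h10]
    refine ⟨by omega, h10, ?_, ?_⟩
    · rw [pvStrLt, pvTimes10 h1]
      exact pvLex_append _ (by simp)
    · rw [pvStrLe, pvTimes10 h1]
      have hge : ∀ c ∈ PySem.Int.toChars y, '0' ≤ c := by
        intro c hc
        obtain ⟨d, hd, rfl⟩ := pvChars_digit hy1 hc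
        exact pvDigitChar_ge0 hd
      rcases pvLex_zero_le (pvStrLt.mp hlt) hge with h | h
      · left; rw [h]
      · right; exact h
  · rw [if_neg h10]
    have hpre : ¬ (PySem.Int.toChars cur <+: PySem.Int.toChars y) := by
      intro hp
      by_cases he : PySem.Int.toChars cur = PySem.Int.toChars y
      · exact absurd (pvStrEq.mpr he) (ne_of_lt hlt)
      · have := pvPrefix_ten h1 hy1 hp he
        omega
    obtain ⟨c1, c2, c3, c4, c5⟩ :=
      pvPop_spec n cur.toNat cur le_rfl h1 y hy1 hyn (pvStrLt.mp hlt) hpre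
    refine ⟨by omega, c2, ?_, ?_⟩
    · rw [pvStrLt]
      obtain ⟨q, d, hd, hq, hq1⟩ := pvBump c1 c4
      obtain ⟨t, htt⟩ := c3
      rw [hq1, ← htt, hq]
      have : (q ++ [Nat.digitChar d]) ++ t = q ++ Nat.digitChar d :: t := by simp
      rw [this]
      exact pvLex_mid q _ _ ((pvDigitChar_lt_iff (by omega) (by omega)).mpr (by omega))
    · rw [pvStrLe]
      rcases c5 with h | h
      · left; exact h
      · right; exact h

lemma pvRange_nodup : ∀ (k : Nat) (a b : Int), (b - a).toNat ≤ k → (PySem.List.pyRange a b).Nodup := by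
  intro k
  induction k with
  | zero =>
    intro a b h
    have : (PySem.List.pyRange a b).length = 0 := by rw [PySem.List.length_pyRange_one]; omega
    rw [List.length_eq_zero_iff] at this
    rw [this]; exact List.nodup_nil
  | succ k ih =>
    intro a b h
    by_cases hab : a < b
    · rw [PySem.List.pyRange_one_cons hab]
      refine List.Nodup.cons ?_ (ih (a+1) b (by omega))
      intro hmem
      rw [PySem.List.mem_pyRange_one] at hmem
      omega
    · have : (PySem.List.pyRange a b).length = 0 := by rw [PySem.List.length_pyRange_one]; omega
      rw [List.length_eq_zero_iff] at this
      rw [this]; exact List.nodup_nil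

lemma pvToStr_inj {x y : Int} (hx : 1 ≤ x) (hy : 1 ≤ y)
    (h : PySem.Int.toStr x = PySem.Int.toStr y) : x = y := by
  have := pvStrEq.mp h
  rw [pvToChars_eq hx, pvToChars_eq hy] at this
  have := pvDC_inj this
  omega

lemma pvOne_min {z : Int} (hz : 1 ≤ z) : PySem.Int.toStr 1 ≤ PySem.Int.toStr z := by
  rw [pvStrLe]
  obtain ⟨c, cs, hcs, hc1, hc9⟩ := pvDC_head (m := z.toNat) (by omega)
  have h1 : PySem.Int.toChars 1 = ['1'] := by decide
  have hz' : PySem.Int.toChars z = c :: cs := by rw [pvToChars_eq hz, hcs]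
  rcases eq_or_lt_of_le hc1 with he | hlt
  · cases cs with
    | nil => left; rw [h1, hz', ← he]
    | cons w ws => right; rw [h1, hz', ← he]; exact List.Lex.cons List.Lex.nil
  · right; rw [h1, hz']; exact List.Lex.rel hlt

-- suffix induction along the sorted list
lemma pvSuf (n : Int) (L : List Int)
    (hmem : ∀ z ∈ L, 1 ≤ z ∧ z ≤ n)
    (hall : ∀ z : Int, 1 ≤ z → z ≤ n → z ∈ L)
    (hpw : L.Pairwise (fun a b => PySem.Int.toStr a < PySem.Int.toStr b)) :
    ∀ (rest pre : List Int) (cur : Int), L = pre ++ cur :: rest →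
      altGo n (rest.length + 1) cur = cur :: rest := by
  intro rest
  induction rest with
  | nil => intro pre cur h; rfl
  | cons y rest' ih =>
    intro pre cur hdec
    have hsub : (cur :: y :: rest').Sublist L := by
      rw [hdec]; exact (List.sublist_append_right _ _)
    have hpw3 : (cur :: y :: rest').Pairwise (fun a b => PySem.Int.toStr a < PySem.Int.toStr b) :=
      hpw.sublist hsub
    have hcury : PySem.Int.toStr cur < PySem.Int.toStr y :=
      (List.pairwise_cons.mp hpw3).1 y List.mem_cons_self
    have hcur : cur ∈ L := by rw [hdec]; simp
    have hy : y ∈ L := by rw [hdec]; simp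
    obtain ⟨hc1, hcn⟩ := hmem cur hcur
    obtain ⟨hy1, hyn⟩ := hmem y hy
    obtain ⟨n1, n2, n3, n4⟩ := pvSucc hc1 hcn hy1 hyn hcury
    set nxt := (if cur * 10 ≤ n then cur * 10 else popWhile cur.toNat n cur + 1) with hnxt
    have hnmem : nxt ∈ L := hall nxt n1 n2
    -- nxt is in the suffix after cur
    have hnxty : nxt = y := by
      rw [hdec] at hnmem hpw
      rcases List.mem_append.mp hnmem with hpre | hsuf
      · -- contradiction: elements of pre are < cur
        have := ((List.pairwise_append.mp hpw).2.2) nxt hpre cur List.mem_cons_self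
        exact absurd (this.trans n3) (lt_irrefl _)
      · rcases List.mem_cons.mp hsuf with he | hsuf2
        · exact absurd (he ▸ n3) (lt_irrefl _)
        · rcases List.mem_cons.mp hsuf2 with he | hsuf3
          · exact he
          · -- contradiction: y < nxt but nxt ≤ y
            have hy_lt : PySem.Int.toStr y < PySem.Int.toStr nxt :=
              (List.pairwise_cons.mp (List.pairwise_cons.mp hpw3).2).1 nxt hsuf3
            exact absurd (lt_of_lt_of_le hy_lt n4) (lt_irrefl _)
    show cur :: altGo n (rest'.length + 1) nxt = cur :: y :: rest'
    rw [hnxty]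
    congr 1
    exact ih (pre ++ [cur]) y (by rw [hdec]; simp)

lemma pvIntOfDec_go (cs : List Char) (h : ∀ c ∈ cs, 48 ≤ c.toNat) : ∀ a : Nat,
    cs.foldl (fun v c => 10 * v + ((c.toNat : Int) - 48)) (a : Int) =
      ((cs.foldl (fun v c => 10 * v + (c.toNat - 48)) a : Nat) : Int) := by
  induction cs with
  | nil => intro a; rfl
  | cons c cs ih =>
    intro a
    have hc := h c List.mem_cons_self
    have hstep : (10 * (a : Int) + ((c.toNat : Int) - 48)) = ((10 * a + (c.toNat - 48) : Nat) : Int) := by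
      omega
    show cs.foldl _ (10 * (a:Int) + ((c.toNat : Int) - 48)) = _
    rw [hstep, ih (fun c hc => h c (List.mem_cons_of_mem _ hc))]
    rfl

lemma pvParse_round {x : Int} (hx : 1 ≤ x) : pvIntOfDec (PySem.Int.toStr x).toList = x := by
  rw [PySem.Int.toList_toStr]
  have hdig : ∀ c ∈ PySem.Int.toChars x, 48 ≤ c.toNat := by
    intro c hc
    obtain ⟨d, hd, rfl⟩ := pvChars_digit hx hc
    rw [pvDigitChar_toNat hd]; omega
  have h0 := pvIntOfDec_go (PySem.Int.toChars x) hdig 0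
  simp only [Nat.cast_zero] at h0
  rw [pvIntOfDec, h0]
  exact pvVal_toChars hx

theorem pvMain (n : Int) : lexicalOrder n = lexicalOrder_alt n := by
  by_cases hn : 1 ≤ n
  case neg =>
    have hr : PySem.List.pyRange 1 (n + 1) = [] := by
      rw [← List.length_eq_zero_iff, PySem.List.length_pyRange_one]; omega
    have ha : lexicalOrder_alt n = [] := by
      rw [lexicalOrder_alt, (by omega : n.toNat = 0)]; rfl
    rw [ha]
    simp only [lexicalOrder, hr, List.foldl_nil]
    rw [(PySem.List.sorted_eq_nil_iff _ _ _).mpr rfl]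
    rfl
  case pos =>
    -- the sorted reference list
    set R := PySem.List.pyRange 1 (n + 1) with hR
    set L := PySem.List.sorted R PySem.Int.toStr false with hL
    have hperm : L.Perm R := PySem.List.sorted_perm _ _ _
    have hmem : ∀ z ∈ L, 1 ≤ z ∧ z ≤ n := by
      intro z hz
      have := hperm.mem_iff.mp hz
      rw [hR, PySem.List.mem_pyRange_one] at this
      omega
    have hall : ∀ z : Int, 1 ≤ z → z ≤ n → z ∈ L := by
      intro z h1 h2
      exact hperm.mem_iff.mpr (by rw [hR, PySem.List.mem_pyRange_one]; omega)
    have hnd : L.Nodup := hperm.nodup_iff.mpr (pvRange_nodup n.toNat 1 (n+1) (by omega))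
    have hple : L.Pairwise (fun a b => PySem.Int.toStr a ≤ PySem.Int.toStr b) :=
      PySem.List.sorted_pairwise _ _
    have hpw : L.Pairwise (fun a b => PySem.Int.toStr a < PySem.Int.toStr b) := by
      have hand := hple.and hnd
      refine hand.imp_of_mem ?_
      intro a b ha hb ⟨hle, hne⟩
      rcases lt_or_eq_of_le hle with h | h
      · exact h
      · exact absurd (pvToStr_inj (hmem a ha).1 (hmem b hb).1 h) hne
    -- B's traversal produces exactly L
    have halt : lexicalOrder_alt n = L := by
      have hlen : L.length = n.toNat := by
        rw [hL, PySem.List.length_sorted, hR, PySem.List.length_pyRange_one]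
        omega
      cases hLc : L with
      | nil => rw [hLc] at hlen; simp at hlen; omega
      | cons h t =>
        have hh1 : h = 1 := by
          by_contra hne
          have h1L : (1:Int) ∈ L := hall 1 le_rfl hn
          have h1t : (1:Int) ∈ t := by
            rcases List.mem_cons.mp (hLc ▸ h1L) with he | ht
            · exact absurd he.symm hne
            · exact ht
          have := (List.pairwise_cons.mp (hLc ▸ hpw)).1 1 h1t
          have hmin := pvOne_min (z := h) (hmem h (hLc ▸ List.mem_cons_self)).1
          exact absurd (lt_of_le_of_lt hmin this) (lt_irrefl _)
        subst hh1
        have hsf := pvSuf n L hmem hall hpw t [] 1 (by rw [hLc]; rfl)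
        have hfuel : n.toNat = t.length + 1 := by
          rw [← hlen, hLc]; rfl
        rw [lexicalOrder_alt, hfuel, hsf]
    -- A sorts the same strings
    have hstrings : PySem.List.sorted ((PySem.List.pyRange 1 (n + 1)).map PySem.Int.toStr)
        (fun s => s) false = (lexicalOrder_alt n).map PySem.Int.toStr := by
      apply PySem.List.sorted_eq_of_perm_of_pairwise_lt
      · rw [halt]; exact hperm.map _
      · rw [halt]
        exact List.pairwise_map.mpr hpw
    simp only [lexicalOrder]
    rw [PySem.List.foldl_append_singleton_eq_map, List.nil_append, hstrings, List.map_map]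
    have hround : ∀ x ∈ lexicalOrder_alt n, ((fun s => pvIntOfDec s.toList) ∘ PySem.Int.toStr) x = x := by
      intro x hx
      have hxL : x ∈ L := by rw [← halt]; exact hx
      exact pvParse_round (hmem x hxL).1
    exact (List.map_congr_left hround).trans (List.map_id _)

-- ===== VERDICT (by name: the statement is the Claim_ definition above) =====
theorem lexicalOrder_spec : Claim_equal_lexicalOrder := by
  intro n _
  unfold Spec_lexicalOrder
  exact pvMain n
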